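-- pv_equiv track=rewrite | github.com/jihun8428/Algorithm_test | PROGRAMMERS/level_0_옹알이(1).py | solution
-- ===== SOURCE A (Python) =====
-- def solution(babbling):
--     a = ["aya", "ye", "woo", "ma"]
--
--     answer = 0
--     for i in babbling:
--         for j in a:
--             if i.__contains__(j):
--                 i = i.replace(j,' ')
--         i = i.strip()
--         if i == '':
--             answer += 1
--     return answer
-- ===== SOURCE B (Python) =====
-- # B: single left-to-right greedy scan per word (fragment heads are distinct, so the
-- # tiling is deterministic) instead of A's four ordered replace passes + strip.
-- def _ok(s):
--     while s:
--         if s[0].isspace():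
--             s = s[1:]
--         elif s.startswith("aya"):
--             s = s[3:]
--         elif s.startswith("ye"):
--             s = s[2:]
--         elif s.startswith("woo"):
--             s = s[3:]
--         elif s.startswith("ma"):
--             s = s[2:]
--         else:
--             return False
--     return True
--
--
-- def solution(babbling):
--     return sum(_ok(w) for w in babbling)
-- ===== Notes on version B (the rewrite author's own statement) =====
-- stated objective: idiomatic
-- what changed: Replaces A's four ordered whole-string replace passes followed by strip with a single left-to-right greedy scan that skips whitespace and consumes one fragment at a time (the fragments' distinct first letters make greedy tiling exact).
import Mathlib
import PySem

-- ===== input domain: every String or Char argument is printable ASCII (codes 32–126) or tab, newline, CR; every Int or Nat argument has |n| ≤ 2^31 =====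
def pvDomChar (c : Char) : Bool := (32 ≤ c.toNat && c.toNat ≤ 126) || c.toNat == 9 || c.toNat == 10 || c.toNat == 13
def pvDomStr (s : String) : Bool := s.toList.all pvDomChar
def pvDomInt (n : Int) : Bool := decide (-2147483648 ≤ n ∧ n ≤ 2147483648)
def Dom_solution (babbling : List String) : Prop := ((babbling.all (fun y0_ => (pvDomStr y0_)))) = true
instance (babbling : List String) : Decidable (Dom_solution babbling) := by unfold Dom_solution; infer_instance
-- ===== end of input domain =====

-- B replaces A's four ordered replace passes + strip with one greedy left-to-right scan per word; equivalence of the return values is proved (no argument is mutated by either).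

-- ===== PORT A =====
def solution (babbling : List String) : Int :=
  let a := ["aya", "ye", "woo", "ma"]
  babbling.foldl (fun answer i =>
    let i := a.foldl (fun i j => if PySem.Str.isIn j i then PySem.Str.replace i j " " else i) i
    let i := PySem.Str.strip i
    if i = "" then answer + 1 else answer) 0

-- ===== PORT B =====
-- _ok's while loop, transcribed as tail recursion on the character list (s[k:] = List.drop k)
def okChars : List Char → Bool
  | [] => true
  | c :: t =>
    if PySem.Chars.isspace c then okChars ((c :: t).drop 1)
    else if PySem.Chars.startswith (c :: t) ['a','y','a'] then okChars ((c :: t).drop 3)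
    else if PySem.Chars.startswith (c :: t) ['y','e'] then okChars ((c :: t).drop 2)
    else if PySem.Chars.startswith (c :: t) ['w','o','o'] then okChars ((c :: t).drop 3)
    else if PySem.Chars.startswith (c :: t) ['m','a'] then okChars ((c :: t).drop 2)
    else false
termination_by l => l.length
decreasing_by all_goals simp [List.length_drop]

def pyOk (s : String) : Bool := okChars s.toList

def solution_alt (babbling : List String) : Int :=
  (babbling.map (fun w => if pyOk w then (1 : Int) else 0)).sum

-- ===== PRECONDITION & SPEC =====
def Spec_solution (babbling : List String) (out : Int) : Prop := out = solution_alt babbling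
instance (babbling : List String) (out : Int) : Decidable (Spec_solution babbling out) := by unfold Spec_solution; infer_instance

-- ===== CLAIM (what is proved, stated in full; the proofs are below) =====
def Claim_equal_solution : Prop := ∀ (babbling : List String), Dom_solution babbling → Spec_solution babbling (solution babbling)

-- ===== LEMMAS AND PROOFS =====

-- replace with the fragment patterns, list side
def Rp (old l : List Char) : List Char := PySem.Chars.replace l old [' ']

-- go without its accumulator
def repF (old new : List Char) : Nat → List Char → List Char
  | _, [] => []
  | 0, l => l
  | (fuel+1), c :: t =>
    if old.isPrefixOf (c :: t) then new ++ repF old new fuel (List.drop old.length (c :: t))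
    else c :: repF old new fuel t

lemma go_acc (old new : List Char) :
    ∀ fuel l acc, PySem.Chars.replace.go old new fuel l acc
      = acc.reverse ++ PySem.Chars.replace.go old new fuel l [] := by
  intro fuel
  induction fuel with
  | zero => intro l acc; rw [PySem.Chars.replace.go.eq_def, PySem.Chars.replace.go.eq_def]; simp
  | succ n ih =>
    intro l acc
    cases l with
    | nil => rw [PySem.Chars.replace.go.eq_def, PySem.Chars.replace.go.eq_def]; simp
    | cons c t =>
      rw [PySem.Chars.replace.go.eq_def]
      conv_rhs => rw [PySem.Chars.replace.go.eq_def]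
      by_cases h : old.isPrefixOf (c :: t) <;> simp [h]
      · rw [ih _ (new.reverse ++ acc), ih _ new.reverse]; simp
      · rw [ih t (c :: acc), ih t [c]]; simp

lemma go_eq_repF (old new : List Char) :
    ∀ fuel l, PySem.Chars.replace.go old new fuel l [] = repF old new fuel l := by
  intro fuel
  induction fuel with
  | zero => intro l; cases l <;> rw [PySem.Chars.replace.go.eq_def] <;> simp [repF]
  | succ n ih =>
    intro l
    cases l with
    | nil => rw [PySem.Chars.replace.go.eq_def]; simp [repF]
    | cons c t =>
      rw [PySem.Chars.replace.go.eq_def]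
      by_cases h : old.isPrefixOf (c :: t) <;> simp [repF, h]
      · rw [go_acc, ih]; simp
      · rw [go_acc, ih]; simp

lemma repF_fuel (old new : List Char) (hold : old ≠ []) :
    ∀ fuel fuel' l, l.length ≤ fuel → l.length ≤ fuel' →
      repF old new fuel l = repF old new fuel' l := by
  intro fuel
  induction fuel with
  | zero =>
    intro fuel' l h1 h2
    have : l = [] := by cases l <;> simp_all
    subst this; cases fuel' <;> simp [repF]
  | succ n ih =>
    intro fuel' l h1 h2
    cases l with
    | nil => cases fuel' <;> simp [repF]
    | cons c t =>
      cases fuel' with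
      | zero => simp at h2
      | succ m =>
        simp only [repF]
        have hol : 1 ≤ old.length := by cases old <;> simp_all
        by_cases h : old.isPrefixOf (c :: t) <;> simp [h]
        · have hlen : (List.drop old.length (c :: t)).length ≤ t.length := by
            rw [List.length_drop]; simp only [List.length_cons]; omega
          have h1' : t.length ≤ n := by simp only [List.length_cons] at h1; omega
          have h2' : t.length ≤ m := by simp only [List.length_cons] at h2; omega
          exact ih m _ (le_trans hlen h1') (le_trans hlen h2')
        · exact ih m t (by simp only [List.length_cons] at h1; omega) (by simp only [List.length_cons] at h2; omega)

lemma Rp_eq_repF (old l : List Char) (hold : old ≠ []) :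
    Rp old l = repF old [' '] l.length l := by
  rw [Rp, PySem.Chars.replace]
  simp [hold]
  rw [go_eq_repF]

lemma Rp_nil (old : List Char) (hold : old ≠ []) : Rp old [] = [] := by
  rw [Rp_eq_repF old [] hold]; simp [repF]

lemma Rp_cons_pos (old : List Char) (hold : old ≠ []) (c : Char) (t : List Char)
    (h : old.isPrefixOf (c :: t)) :
    Rp old (c :: t) = ' ' :: Rp old (List.drop old.length (c :: t)) := by
  have hol : 1 ≤ old.length := by cases old <;> simp_all
  rw [Rp_eq_repF old _ hold, Rp_eq_repF old _ hold]
  have hlen : (List.drop old.length (c :: t)).length ≤ t.length := by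
    rw [List.length_drop]; simp only [List.length_cons]; omega
  simp only [List.length_cons, repF, h]
  simp only [if_true]
  rw [repF_fuel old [' '] hold t.length (List.drop old.length (c :: t)).length _ hlen le_rfl]
  simp

lemma Rp_cons_neg (old : List Char) (hold : old ≠ []) (c : Char) (t : List Char)
    (h : ¬ old.isPrefixOf (c :: t)) :
    Rp old (c :: t) = c :: Rp old t := by
  rw [Rp_eq_repF old _ hold, Rp_eq_repF old _ hold]
  simp only [List.length_cons, repF, h]
  simp

lemma Rp_pass (h : Char) (old' : List Char) (c : Char) (t : List Char) (hne : c ≠ h) :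
    Rp (h :: old') (c :: t) = c :: Rp (h :: old') t := by
  apply Rp_cons_neg _ (by simp)
  simp [List.isPrefixOf]
  intro hc; exact absurd hc.symm hne

-- head of a replace result is ' ' or the original head
lemma Rp_head (old : List Char) (hold : old ≠ []) (c : Char) (t : List Char) :
    ∃ e X, Rp old (c :: t) = e :: X ∧ (e = ' ' ∨ e = c) := by
  by_cases h : old.isPrefixOf (c :: t)
  · exact ⟨' ', _, Rp_cons_pos old hold c t h, Or.inl rfl⟩
  · exact ⟨c, _, Rp_cons_neg old hold c t h, Or.inr rfl⟩

lemma Rp_not_isIn (old : List Char) (hold : old ≠ []) :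
    ∀ l, PySem.Chars.isIn old l = false → Rp old l = l := by
  intro l
  induction l with
  | nil => intro _; exact Rp_nil old hold
  | cons c t ih =>
    intro hni
    have hinf : ¬ old <:+: (c :: t) := (PySem.Chars.isIn_eq_false_iff _ _).mp hni
    have hnp : ¬ old.isPrefixOf (c :: t) := by
      intro hp
      exact hinf (List.IsPrefix.isInfix (List.isPrefixOf_iff_prefix.mp hp))
    rw [Rp_cons_neg old hold c t hnp, ih]
    apply (PySem.Chars.isIn_eq_false_iff _ _).mpr
    intro hinf'
    exact hinf (hinf'.trans (List.suffix_cons c t).isInfix)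

lemma Rp2_head (o1 o2 : List Char) (h1 : o1 ≠ []) (h2 : o2 ≠ []) (d : Char) (t : List Char) :
    ∃ e X, Rp o2 (Rp o1 (d :: t)) = e :: X ∧ (e = ' ' ∨ e = d) := by
  obtain ⟨e1, X1, hE1, he1⟩ := Rp_head o1 h1 d t
  rw [hE1]
  obtain ⟨e2, X2, hE2, he2⟩ := Rp_head o2 h2 e1 X1
  refine ⟨e2, X2, hE2, ?_⟩
  rcases he2 with rfl | rfl
  · exact Or.inl rfl
  · exact he1

lemma Rp3_head (o1 o2 o3 : List Char) (h1 : o1 ≠ []) (h2 : o2 ≠ []) (h3 : o3 ≠ [])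
    (d : Char) (t : List Char) :
    ∃ e X, Rp o3 (Rp o2 (Rp o1 (d :: t))) = e :: X ∧ (e = ' ' ∨ e = d) := by
  obtain ⟨e1, X1, hE1, he1⟩ := Rp2_head o1 o2 h1 h2 d t
  rw [hE1]
  obtain ⟨e2, X2, hE2, he2⟩ := Rp_head o3 h3 e1 X1
  refine ⟨e2, X2, hE2, ?_⟩
  rcases he2 with rfl | rfl
  · exact Or.inl rfl
  · exact he1

def chain (l : List Char) : List Char :=
  Rp ['m','a'] (Rp ['w','o','o'] (Rp ['y','e'] (Rp ['a','y','a'] l)))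

lemma chain_cons_pass (c : Char) (t : List Char)
    (h1 : c ≠ 'a') (h2 : c ≠ 'y') (h3 : c ≠ 'w') (h4 : c ≠ 'm') :
    chain (c :: t) = c :: chain t := by
  simp only [chain]
  rw [Rp_pass 'a' ['y','a'] c t h1, Rp_pass 'y' ['e'] c _ h2,
      Rp_pass 'w' ['o','o'] c _ h3, Rp_pass 'm' ['a'] c _ h4]

lemma chain_all_isspace_aux : ∀ n (l : List Char), l.length ≤ n →
    (chain l).all PySem.Chars.isspace = okChars l := by
  intro n
  induction n with
  | zero =>
    intro l hlen
    have hl : l = [] := by cases l <;> simp_all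
    subst hl
    rw [okChars]
    simp [chain, Rp_nil]
  | succ n ih =>
    intro l hlen
    cases l with
    | nil => rw [okChars]; simp [chain, Rp_nil]
    | cons c t =>
      simp only [List.length_cons] at hlen
      rw [okChars]
      by_cases hsp : PySem.Chars.isspace c
      · -- whitespace head: every pass skips it
        have hca : c ≠ 'a' := by rintro rfl; exact absurd hsp (by decide)
        have hcy : c ≠ 'y' := by rintro rfl; exact absurd hsp (by decide)
        have hcw : c ≠ 'w' := by rintro rfl; exact absurd hsp (by decide)
        have hcm : c ≠ 'm' := by rintro rfl; exact absurd hsp (by decide)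
        rw [chain_cons_pass c t hca hcy hcw hcm]
        simp only [List.all_cons, hsp, Bool.true_and, if_pos, List.drop_one, List.tail_cons]
        exact ih t (by omega)
      · by_cases ha : List.isPrefixOf ['a','y','a'] (c :: t)
        · -- "aya" consumed at the head
          obtain ⟨r, hr⟩ := List.isPrefixOf_iff_prefix.mp ha
          have hr' : 'a' :: 'y' :: 'a' :: r = c :: t := hr
          injection hr' with h1 h2
          subst h1; subst h2
          have e1 : Rp ['a','y','a'] ('a'::'y'::'a'::r) = ' ' :: Rp ['a','y','a'] r := by
            rw [Rp_cons_pos ['a','y','a'] (by simp) _ _ ha]; simp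
          have e4 : chain ('a'::'y'::'a'::r) = ' ' :: chain r := by
            simp only [chain]
            rw [e1, Rp_pass 'y' ['e'] ' ' _ (by decide),
                Rp_pass 'w' ['o','o'] ' ' _ (by decide), Rp_pass 'm' ['a'] ' ' _ (by decide)]
          rw [e4]
          simp only [List.all_cons, show PySem.Chars.isspace ' ' = true by decide, Bool.true_and,
            PySem.Chars.startswith, ha, show PySem.Chars.isspace 'a' = false by decide,
            Bool.false_eq_true, if_false, if_true, List.drop_succ_cons, List.drop_zero]
          simp only [List.length_cons] at hlen
          exact ih r (by omega)
        · by_cases hy : List.isPrefixOf ['y','e'] (c :: t)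
          · obtain ⟨r, hr⟩ := List.isPrefixOf_iff_prefix.mp hy
            have hr' : 'y' :: 'e' :: r = c :: t := hr
            injection hr' with h1 h2
            subst h1; subst h2
            have e1 : Rp ['a','y','a'] ('y'::'e'::r) = 'y' :: 'e' :: Rp ['a','y','a'] r := by
              rw [Rp_pass 'a' ['y','a'] 'y' _ (by decide), Rp_pass 'a' ['y','a'] 'e' _ (by decide)]
            have e2 : Rp ['y','e'] ('y' :: 'e' :: Rp ['a','y','a'] r)
                = ' ' :: Rp ['y','e'] (Rp ['a','y','a'] r) := by
              rw [Rp_cons_pos ['y','e'] (by simp) _ _ (by simp [List.isPrefixOf])]; simp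
            have e4 : chain ('y'::'e'::r) = ' ' :: chain r := by
              simp only [chain]
              rw [e1, e2, Rp_pass 'w' ['o','o'] ' ' _ (by decide), Rp_pass 'm' ['a'] ' ' _ (by decide)]
            rw [e4]
            simp only [List.all_cons, show PySem.Chars.isspace ' ' = true by decide, Bool.true_and,
              PySem.Chars.startswith, ha, hy, show PySem.Chars.isspace 'y' = false by decide,
              Bool.false_eq_true, if_false, if_true, List.drop_succ_cons, List.drop_zero]
            simp only [List.length_cons] at hlen
            exact ih r (by omega)
          · by_cases hw : List.isPrefixOf ['w','o','o'] (c :: t)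
            · obtain ⟨r, hr⟩ := List.isPrefixOf_iff_prefix.mp hw
              have hr' : 'w' :: 'o' :: 'o' :: r = c :: t := hr
              injection hr' with h1 h2
              subst h1; subst h2
              have e1 : Rp ['a','y','a'] ('w'::'o'::'o'::r)
                  = 'w' :: 'o' :: 'o' :: Rp ['a','y','a'] r := by
                rw [Rp_pass 'a' ['y','a'] 'w' _ (by decide), Rp_pass 'a' ['y','a'] 'o' _ (by decide),
                    Rp_pass 'a' ['y','a'] 'o' _ (by decide)]
              have e2 : Rp ['y','e'] ('w' :: 'o' :: 'o' :: Rp ['a','y','a'] r)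
                  = 'w' :: 'o' :: 'o' :: Rp ['y','e'] (Rp ['a','y','a'] r) := by
                rw [Rp_pass 'y' ['e'] 'w' _ (by decide), Rp_pass 'y' ['e'] 'o' _ (by decide),
                    Rp_pass 'y' ['e'] 'o' _ (by decide)]
              have e3 : Rp ['w','o','o'] ('w' :: 'o' :: 'o' :: Rp ['y','e'] (Rp ['a','y','a'] r))
                  = ' ' :: Rp ['w','o','o'] (Rp ['y','e'] (Rp ['a','y','a'] r)) := by
                rw [Rp_cons_pos ['w','o','o'] (by simp) _ _ (by simp [List.isPrefixOf])]; simp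
              have e4 : chain ('w'::'o'::'o'::r) = ' ' :: chain r := by
                simp only [chain]
                rw [e1, e2, e3, Rp_pass 'm' ['a'] ' ' _ (by decide)]
              rw [e4]
              simp only [List.all_cons, show PySem.Chars.isspace ' ' = true by decide, Bool.true_and,
                PySem.Chars.startswith, ha, hy, hw, show PySem.Chars.isspace 'w' = false by decide,
                Bool.false_eq_true, if_false, if_true, List.drop_succ_cons, List.drop_zero]
              simp only [List.length_cons] at hlen
              exact ih r (by omega)
            · by_cases hm : List.isPrefixOf ['m','a'] (c :: t)
              · obtain ⟨r, hr⟩ := List.isPrefixOf_iff_prefix.mp hm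
                have hr' : 'm' :: 'a' :: r = c :: t := hr
                injection hr' with h1 h2
                subst h1; subst h2
                by_cases ha2 : List.isPrefixOf ['a','y','a'] ('a' :: r)
                · -- "maya…": A keeps the 'm', B fails right after consuming "ma"
                  obtain ⟨r2, hr2⟩ := List.isPrefixOf_iff_prefix.mp ha2
                  have hr2' : 'a' :: 'y' :: 'a' :: r2 = 'a' :: r := hr2
                  injection hr2' with _ h2'
                  subst h2'
                  have e1 : Rp ['a','y','a'] ('m'::'a'::'y'::'a'::r2)
                      = 'm' :: ' ' :: Rp ['a','y','a'] r2 := by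
                    rw [Rp_pass 'a' ['y','a'] 'm' _ (by decide),
                        Rp_cons_pos ['a','y','a'] (by simp) _ _ ha2]
                    simp
                  have e2 : Rp ['y','e'] ('m' :: ' ' :: Rp ['a','y','a'] r2)
                      = 'm' :: ' ' :: Rp ['y','e'] (Rp ['a','y','a'] r2) := by
                    rw [Rp_pass 'y' ['e'] 'm' _ (by decide), Rp_pass 'y' ['e'] ' ' _ (by decide)]
                  have e3 : Rp ['w','o','o'] ('m' :: ' ' :: Rp ['y','e'] (Rp ['a','y','a'] r2))
                      = 'm' :: ' ' :: Rp ['w','o','o'] (Rp ['y','e'] (Rp ['a','y','a'] r2)) := by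
                    rw [Rp_pass 'w' ['o','o'] 'm' _ (by decide), Rp_pass 'w' ['o','o'] ' ' _ (by decide)]
                  have eZ : chain ('m'::'a'::'y'::'a'::r2)
                      = 'm' :: Rp ['m','a'] (' ' :: Rp ['w','o','o'] (Rp ['y','e'] (Rp ['a','y','a'] r2))) := by
                    simp only [chain]
                    rw [e1, e2, e3, Rp_cons_neg ['m','a'] (by simp) _ _ (by simp [List.isPrefixOf])]
                  have hRHS : okChars ('y'::'a'::r2) = false := by
                    rw [okChars]
                    simp [List.isPrefixOf, PySem.Chars.startswith,
                      show PySem.Chars.isspace 'y' = false by decide]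
                  rw [eZ]
                  simp [List.all_cons, PySem.Chars.startswith, ha, hy, hw, hm, hRHS,
                    show PySem.Chars.isspace 'm' = false by decide]
                · have e1 : Rp ['a','y','a'] ('m'::'a'::r) = 'm' :: 'a' :: Rp ['a','y','a'] r := by
                    rw [Rp_pass 'a' ['y','a'] 'm' _ (by decide),
                        Rp_cons_neg ['a','y','a'] (by simp) _ _ ha2]
                  have e2 : Rp ['y','e'] ('m' :: 'a' :: Rp ['a','y','a'] r)
                      = 'm' :: 'a' :: Rp ['y','e'] (Rp ['a','y','a'] r) := by
                    rw [Rp_pass 'y' ['e'] 'm' _ (by decide), Rp_pass 'y' ['e'] 'a' _ (by decide)]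
                  have e3 : Rp ['w','o','o'] ('m' :: 'a' :: Rp ['y','e'] (Rp ['a','y','a'] r))
                      = 'm' :: 'a' :: Rp ['w','o','o'] (Rp ['y','e'] (Rp ['a','y','a'] r)) := by
                    rw [Rp_pass 'w' ['o','o'] 'm' _ (by decide), Rp_pass 'w' ['o','o'] 'a' _ (by decide)]
                  have e4 : chain ('m'::'a'::r) = ' ' :: chain r := by
                    simp only [chain]
                    rw [e1, e2, e3,
                        Rp_cons_pos ['m','a'] (by simp) _ _ (by simp [List.isPrefixOf])]
                    simp
                  rw [e4]
                  simp only [List.all_cons, show PySem.Chars.isspace ' ' = true by decide,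
                    Bool.true_and, PySem.Chars.startswith, ha, hy, hw, hm,
                    show PySem.Chars.isspace 'm' = false by decide,
                    Bool.false_eq_true, if_false, if_true, List.drop_succ_cons, List.drop_zero]
                  simp only [List.length_cons] at hlen
                  exact ih r (by omega)
              · -- no fragment matches and the head is not whitespace: both sides are false
                have hB : PySem.Chars.isspace c = false := by
                  revert hsp; cases PySem.Chars.isspace c <;> simp
                have s1 : Rp ['a','y','a'] (c :: t) = c :: Rp ['a','y','a'] t :=
                  Rp_cons_neg _ (by simp) _ _ ha
                have s2 : ¬ List.isPrefixOf ['y','e'] (c :: Rp ['a','y','a'] t) = true := by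
                  by_cases hcy : c = 'y'
                  · subst hcy
                    cases t with
                    | nil =>
                      rw [Rp_nil ['a','y','a'] (by simp)]
                      decide
                    | cons d t' =>
                      have hd : d ≠ 'e' := by
                        rintro rfl; exact hy (by simp [List.isPrefixOf])
                      obtain ⟨e, X, hE, he⟩ := Rp_head ['a','y','a'] (by simp) d t'
                      rw [hE]
                      rcases he with rfl | rfl <;> simp [List.isPrefixOf, Ne.symm hd]
                  · simp [List.isPrefixOf]
                    intro h'; exact absurd h'.symm hcy
                have s2' : Rp ['y','e'] (c :: Rp ['a','y','a'] t)
                    = c :: Rp ['y','e'] (Rp ['a','y','a'] t) := Rp_cons_neg _ (by simp) _ _ s2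
                have s3 : ¬ List.isPrefixOf ['w','o','o']
                    (c :: Rp ['y','e'] (Rp ['a','y','a'] t)) = true := by
                  by_cases hcw : c = 'w'
                  · subst hcw
                    cases t with
                    | nil =>
                      rw [Rp_nil ['a','y','a'] (by simp), Rp_nil ['y','e'] (by simp)]
                      decide
                    | cons d t' =>
                      by_cases hdo : d = 'o'
                      · subst hdo
                        cases t' with
                        | nil =>
                          rw [Rp_pass 'a' ['y','a'] 'o' _ (by decide), Rp_nil ['a','y','a'] (by simp),
                              Rp_pass 'y' ['e'] 'o' _ (by decide), Rp_nil ['y','e'] (by simp)]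
                          decide
                        | cons e t'' =>
                          have he' : e ≠ 'o' := by
                            rintro rfl; exact hw (by simp [List.isPrefixOf])
                          rw [Rp_pass 'a' ['y','a'] 'o' _ (by decide),
                              Rp_pass 'y' ['e'] 'o' _ (by decide)]
                          obtain ⟨f, Y, hF, hf⟩ :=
                            Rp2_head ['a','y','a'] ['y','e'] (by simp) (by simp) e t''
                          rw [hF]
                          rcases hf with rfl | rfl <;> simp [List.isPrefixOf, Ne.symm he']
                      · obtain ⟨f, Y, hF, hf⟩ :=
                          Rp2_head ['a','y','a'] ['y','e'] (by simp) (by simp) d t'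
                        rw [hF]
                        rcases hf with rfl | rfl <;> simp [List.isPrefixOf, Ne.symm hdo]
                  · simp [List.isPrefixOf]
                    intro h'; exact absurd h'.symm hcw
                have s3' : Rp ['w','o','o'] (c :: Rp ['y','e'] (Rp ['a','y','a'] t))
                    = c :: Rp ['w','o','o'] (Rp ['y','e'] (Rp ['a','y','a'] t)) :=
                  Rp_cons_neg _ (by simp) _ _ s3
                have s4 : ¬ List.isPrefixOf ['m','a']
                    (c :: Rp ['w','o','o'] (Rp ['y','e'] (Rp ['a','y','a'] t))) = true := by
                  by_cases hcm : c = 'm'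
                  · subst hcm
                    cases t with
                    | nil =>
                      rw [Rp_nil ['a','y','a'] (by simp), Rp_nil ['y','e'] (by simp),
                          Rp_nil ['w','o','o'] (by simp)]
                      decide
                    | cons d t' =>
                      have hd : d ≠ 'a' := by
                        rintro rfl; exact hm (by simp [List.isPrefixOf])
                      obtain ⟨f, Y, hF, hf⟩ := Rp3_head ['a','y','a'] ['y','e'] ['w','o','o']
                        (by simp) (by simp) (by simp) d t'
                      rw [hF]
                      rcases hf with rfl | rfl <;> simp [List.isPrefixOf, Ne.symm hd]
                  · simp [List.isPrefixOf]
                    intro h'; exact absurd h'.symm hcm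
                have s4' : Rp ['m','a'] (c :: Rp ['w','o','o'] (Rp ['y','e'] (Rp ['a','y','a'] t)))
                    = c :: Rp ['m','a'] (Rp ['w','o','o'] (Rp ['y','e'] (Rp ['a','y','a'] t))) :=
                  Rp_cons_neg _ (by simp) _ _ s4
                have e4 : chain (c :: t) = c :: chain t := by
                  simp only [chain]; rw [s1, s2', s3', s4']
                rw [e4]
                simp [List.all_cons, hB, PySem.Chars.startswith, ha, hy, hw, hm]

lemma chain_all_isspace (l : List Char) :
    (chain l).all PySem.Chars.isspace = okChars l :=
  chain_all_isspace_aux l.length l le_rfl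

lemma strip_eq_nil_iff (l : List Char) :
    (PySem.Chars.strip l = []) ↔ l.all PySem.Chars.isspace = true := by
  simp [PySem.Chars.strip, PySem.Chars.rstrip, PySem.Chars.lstrip,
    List.dropWhile_eq_nil_iff, List.all_eq_true]
  constructor
  · intro hL x hx
    rcases (List.mem_append.mp
      (by rw [List.takeWhile_append_dropWhile (p := PySem.Chars.isspace) (l := l)]; exact hx :
        x ∈ List.takeWhile PySem.Chars.isspace l ++ List.dropWhile PySem.Chars.isspace l)) with h1 | h1
    · exact List.mem_takeWhile_imp h1
    · exact hL x h1
  · intro hL x hx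
    exact hL x ((List.dropWhile_sublist _).mem hx)

lemma step_eq (i j : String) (hj : j.toList ≠ []) :
    (if PySem.Str.isIn j i then PySem.Str.replace i j " " else i).toList
      = Rp j.toList i.toList := by
  by_cases h : PySem.Str.isIn j i
  · rw [if_pos h]
    simp [Rp]
  · rw [if_neg (by simpa using h)]
    symm
    exact Rp_not_isIn j.toList hj i.toList (by simpa [PySem.Str.isIn] using h)

lemma inner_toList (w : String) :
    (List.foldl (fun i j => if PySem.Str.isIn j i then PySem.Str.replace i j " " else i)
        w ["aya", "ye", "woo", "ma"]).toList = chain w.toList := by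
  simp only [List.foldl_cons, List.foldl_nil]
  rw [step_eq _ _ (by decide), step_eq _ _ (by decide), step_eq _ _ (by decide),
      step_eq _ _ (by decide)]
  simp only [chain, show ("aya" : String).toList = ['a','y','a'] from by decide,
    show ("ye" : String).toList = ['y','e'] from by decide,
    show ("woo" : String).toList = ['w','o','o'] from by decide,
    show ("ma" : String).toList = ['m','a'] from by decide]

lemma word_cond (w : String) :
    (PySem.Str.strip (List.foldl
        (fun i j => if PySem.Str.isIn j i then PySem.Str.replace i j " " else i)
        w ["aya", "ye", "woo", "ma"]) = "")
      ↔ pyOk w = true := by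
  rw [← String.toList_eq_nil_iff]
  rw [show (PySem.Str.strip (List.foldl
      (fun i j => if PySem.Str.isIn j i then PySem.Str.replace i j " " else i)
      w ["aya", "ye", "woo", "ma"])).toList
    = PySem.Chars.strip (chain w.toList) from by
      rw [PySem.Str.toList_strip, inner_toList]]
  rw [strip_eq_nil_iff, chain_all_isspace, pyOk]

-- ===== VERDICT (by name: the statement is the Claim_ definition above) =====
theorem solution_spec : Claim_equal_solution := by
  intro babbling _
  unfold Spec_solution solution solution_alt
  suffices h : ∀ (bs : List String) (acc : Int),
      List.foldl (fun answer i =>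
        let i := List.foldl
          (fun i j => if PySem.Str.isIn j i then PySem.Str.replace i j " " else i)
          i ["aya", "ye", "woo", "ma"]
        let i := PySem.Str.strip i
        if i = "" then answer + 1 else answer) acc bs
      = acc + (bs.map (fun w => if pyOk w then (1 : Int) else 0)).sum by
    exact (h babbling 0).trans (zero_add _)
  intro bs
  induction bs with
  | nil => intro acc; rw [List.foldl_nil, List.map_nil, List.sum_nil, add_zero]
  | cons w bs ih =>
    intro acc
    rw [List.foldl_cons, ih, List.map_cons, List.sum_cons]
    show (if PySem.Str.strip (List.foldl
        (fun i j => if PySem.Str.isIn j i then PySem.Str.replace i j " " else i)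
        w ["aya", "ye", "woo", "ma"]) = "" then acc + 1 else acc)
      + (List.map (fun w => if pyOk w then (1 : Int) else 0) bs).sum
      = acc + ((if pyOk w then (1 : Int) else 0)
          + (List.map (fun w => if pyOk w then (1 : Int) else 0) bs).sum)
    by_cases hw : pyOk w
    · rw [if_pos ((word_cond w).mpr hw), if_pos hw]; ring
    · rw [if_neg (fun hc => hw ((word_cond w).mp hc)), if_neg hw]; ring
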